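-- pv_equiv track=rewrite | github.com/cayleypy/cayleypy | cayleypy/puzzles/globe.py | globe_gens
-- ===== SOURCE A (Python) =====
-- from typing import Dict
--
-- def help_cyclic(start_pos: int, finish_pos: int, N: int) -> list[int]:
--     lst = []
--     for i in range(start_pos):
--         lst.append(i)
--     for i in range(start_pos, finish_pos + 1):
--         lst.append((i + 1) if i != finish_pos else start_pos)
--     for i in range(finish_pos + 1, N):
--         lst.append(i)
--     return lst
--
-- def globe_gens(A: int, B: int) -> Dict[str, list[int]]:
--     gens = {}
--     x_count = 2 * B
--     y_count = A + 1
--     N = 2 * (A + 1) * B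
--     for r_count in range(y_count):
--         gens[f"r{r_count}"] = help_cyclic(r_count * x_count, (r_count + 1) * x_count - 1, N)
--
--     total_A = y_count - 1
--     for f_count in range(x_count):
--         lst = list(range(N))
--
--         for i in range(y_count // 2):
--             block1 = []
--             block2 = []
--             for k in range(B):
--                 idx1 = i * x_count + (f_count + k) % x_count
--                 block1.append(idx1)
--                 idx2 = (total_A - i) * x_count + (f_count + k) % x_count
--                 block2.append(idx2)
--             for k in range(B):
--                 idx1 = block1[k]
--                 idx2 = block2[B - 1 - k]
--                 lst[idx1], lst[idx2] = lst[idx2], lst[idx1]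
--         gens[f"f{f_count}"] = lst
--
--     return gens
-- ===== SOURCE B (Python) =====
-- def _cyc(start, finish, j):
--     if j == finish:
--         return start
--     if start <= j <= finish:
--         return j + 1
--     return j
--
-- def _image(x_count, total_A, h, B, f, j):
--     row, col = divmod(j, x_count)
--     if row < h and (col - f) % x_count < B:
--         k = (col - f) % x_count
--         return (total_A - row) * x_count + (f + B - 1 - k) % x_count
--     if total_A - row < h and (f + B - 1 - col) % x_count < B:
--         k = (f + B - 1 - col) % x_count
--         return (total_A - row) * x_count + (f + k) % x_count
--     return j
--
-- def globe_gens(A, B):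
--     x_count = 2 * B
--     y_count = A + 1
--     N = 2 * (A + 1) * B
--     total_A = y_count - 1
--     h = y_count // 2
--     gens = {}
--     for r in range(y_count):
--         start = r * x_count
--         finish = (r + 1) * x_count - 1
--         gens[f"r{r}"] = [_cyc(start, finish, j) for j in range(N)]
--     for f in range(x_count):
--         gens[f"f{f}"] = [_image(x_count, total_A, h, B, f, j) for j in range(N)]
--     return gens
-- ===== Notes on version B (the rewrite author's own statement) =====
-- stated objective: simpler
-- what changed: Each generator entry is computed directly: r-entries as a per-index cyclic-shift formula instead of help_cyclic's three append loops, and f-entries as a closed-form reflection image per index (divmod + modular arithmetic) instead of building index blocks and mutating an identity list with paired swaps.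
import Mathlib
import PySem

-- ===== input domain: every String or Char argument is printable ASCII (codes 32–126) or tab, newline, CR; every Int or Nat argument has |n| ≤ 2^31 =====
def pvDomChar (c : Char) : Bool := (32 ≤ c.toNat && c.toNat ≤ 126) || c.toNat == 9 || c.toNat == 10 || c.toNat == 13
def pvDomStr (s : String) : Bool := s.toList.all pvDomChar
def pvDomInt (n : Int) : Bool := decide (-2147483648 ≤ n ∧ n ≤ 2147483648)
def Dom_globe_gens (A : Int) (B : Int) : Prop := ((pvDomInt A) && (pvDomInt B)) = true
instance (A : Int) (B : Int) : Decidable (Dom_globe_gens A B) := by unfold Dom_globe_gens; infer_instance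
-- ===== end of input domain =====

-- B computes each generator entry directly as an index-image formula (comprehensions) instead of
-- building help_cyclic by three append loops and mutating an identity list with paired block swaps. (objective: simpler)


-- ===== PORT A =====
def pvHelpCyclic (s f N : Int) : List Int :=
  let l1 := (PySem.List.pyRange 0 s 1).foldl (fun acc i => acc ++ [i]) []
  let l2 := (PySem.List.pyRange s (f + 1) 1).foldl
      (fun acc i => acc ++ [if i ≠ f then i + 1 else s]) l1
  (PySem.List.pyRange (f + 1) N 1).foldl (fun acc i => acc ++ [i]) l2

def globe_gens (A : Int) (B : Int) : List (String × List Int) :=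
  let x := 2 * B
  let y := A + 1
  let N := 2 * (A + 1) * B
  let gens : PySem.Dict String (List Int) :=
    (PySem.List.pyRange 0 y 1).foldl
      (fun g r => g.insert ("r" ++ PySem.Int.toStr r)
        (pvHelpCyclic (r * x) ((r + 1) * x - 1) N)) PySem.Dict.empty
  let totalA := y - 1
  let gens := (PySem.List.pyRange 0 x 1).foldl
    (fun g f =>
      let lst0 := PySem.List.pyRange 0 N 1
      let lst := (PySem.List.pyRange 0 (PySem.Int.floordiv y 2) 1).foldl
        (fun lst i =>
          let block1 := (PySem.List.pyRange 0 B 1).foldl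
            (fun acc k => acc ++ [i * x + PySem.Int.mod (f + k) x]) []
          let block2 := (PySem.List.pyRange 0 B 1).foldl
            (fun acc k => acc ++ [(totalA - i) * x + PySem.Int.mod (f + k) x]) []
          (PySem.List.pyRange 0 B 1).foldl
            (fun lst k =>
              let idx1 := PySem.List.pyGetD block1 k 0
              let idx2 := PySem.List.pyGetD block2 (B - 1 - k) 0
              let v2 := PySem.List.pyGetD lst idx2 0
              let v1 := PySem.List.pyGetD lst idx1 0
              PySem.List.pySetD (PySem.List.pySetD lst idx1 v2) idx2 v1) lst) lst0
      g.insert ("f" ++ PySem.Int.toStr f) lst) gens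
  gens.items

-- ===== PORT B =====
def pvCyc (start finish j : Int) : Int :=
  if j = finish then start
  else if start ≤ j ∧ j ≤ finish then j + 1
  else j

def pvImage (x totalA h B f j : Int) : Int :=
  let row := PySem.Int.floordiv j x
  let col := PySem.Int.mod j x
  if row < h ∧ PySem.Int.mod (col - f) x < B then
    (totalA - row) * x + PySem.Int.mod (f + B - 1 - PySem.Int.mod (col - f) x) x
  else if totalA - row < h ∧ PySem.Int.mod (f + B - 1 - col) x < B then
    (totalA - row) * x + PySem.Int.mod (f + PySem.Int.mod (f + B - 1 - col) x) x
  else j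

def globe_gens_alt (A : Int) (B : Int) : List (String × List Int) :=
  let x := 2 * B
  let y := A + 1
  let N := 2 * (A + 1) * B
  let totalA := y - 1
  let h := PySem.Int.floordiv y 2
  let gens : PySem.Dict String (List Int) :=
    (PySem.List.pyRange 0 y 1).foldl
      (fun g r => g.insert ("r" ++ PySem.Int.toStr r)
        ((PySem.List.pyRange 0 N 1).map (fun j => pvCyc (r * x) ((r + 1) * x - 1) j)))
      PySem.Dict.empty
  let gens := (PySem.List.pyRange 0 x 1).foldl
    (fun g f => g.insert ("f" ++ PySem.Int.toStr f)
      ((PySem.List.pyRange 0 N 1).map (fun j => pvImage x totalA h B f j))) gens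
  gens.items

-- ===== PRECONDITION & SPEC =====
def Spec_globe_gens (A : Int) (B : Int) (out : List (String × List Int)) : Prop := out = globe_gens_alt A B
instance (A : Int) (B : Int) (out : List (String × List Int)) : Decidable (Spec_globe_gens A B out) := by unfold Spec_globe_gens; infer_instance

-- ===== CLAIM (what is proved, stated in full; the proofs are below) =====
def Claim_equal_globe_gens : Prop := ∀ (A : Int) (B : Int), Dom_globe_gens A B → Spec_globe_gens A B (globe_gens A B)

-- ===== LEMMAS AND PROOFS =====

-- arithmetic helpers (variable divisor x, so omega cannot be used directly on / and %)
theorem pvRowCol (x r c : Int) (hx : 0 < x) (h0 : 0 ≤ c) (h1 : c < x) :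
    (r * x + c) / x = r ∧ (r * x + c) % x = c := by
  constructor
  · rw [add_comm, Int.add_mul_ediv_right _ _ (ne_of_gt hx), Int.ediv_eq_zero_of_lt h0 h1, zero_add]
  · rw [add_comm, Int.add_mul_emod_self_right, Int.emod_eq_of_lt h0 h1]

theorem pvModAddCancel (x a b : Int) : (a + (b - a) % x) % x = b % x := by
  rw [Int.add_emod, Int.emod_emod_of_dvd _ dvd_rfl, ← Int.add_emod]
  norm_num

theorem pvModSubCancel (x a b : Int) : (a - (a - b) % x) % x = b % x := by
  rw [Int.sub_emod, Int.emod_emod_of_dvd _ dvd_rfl, ← Int.sub_emod]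
  norm_num

theorem pvM1 (x f k : Int) (h0 : 0 ≤ k) (h1 : k < x) : ((f + k) % x - f) % x = k := by
  have h : ((f + k) % x - f) % x = ((f + k) - f) % x := by
    rw [Int.sub_emod, Int.emod_emod_of_dvd _ dvd_rfl, ← Int.sub_emod]
  rw [h, show f + k - f = k by ring, Int.emod_eq_of_lt h0 h1]

theorem pvCellBounds (x y r c : Int) (hr0 : 0 ≤ r) (hr1 : r < y) (hc0 : 0 ≤ c) (hc1 : c < x) :
    0 ≤ r * x + c ∧ r * x + c < y * x := by
  constructor
  · nlinarith
  · nlinarith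

theorem pvCellInj (x r c r' c' : Int) (hx : 0 < x) (hc0 : 0 ≤ c) (hc1 : c < x)
    (hc0' : 0 ≤ c') (hc1' : c' < x) (h : r * x + c = r' * x + c') : r = r' ∧ c = c' := by
  have e1 := (pvRowCol x r c hx hc0 hc1).1
  have e2 := (pvRowCol x r' c' hx hc0' hc1').1
  have e3 := (pvRowCol x r c hx hc0 hc1).2
  have e4 := (pvRowCol x r' c' hx hc0' hc1').2
  rw [h] at e1 e3
  exact ⟨e1.symm.trans e2, e3.symm.trans e4⟩

-- proof-side image functions (plain ediv/emod so that decomposition lemmas apply)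
def pvImgF (x totalA B f i0 j : Int) : Int :=
  if j / x < i0 ∧ (j % x - f) % x < B then
    (totalA - j / x) * x + (f + B - 1 - (j % x - f) % x) % x
  else if totalA - j / x < i0 ∧ (f + B - 1 - j % x) % x < B then
    (totalA - j / x) * x + (f + (f + B - 1 - j % x) % x) % x
  else j

def pvImg2 (x totalA B f i0 k0 j : Int) : Int :=
  if j / x = i0 ∧ (j % x - f) % x < k0 then
    (totalA - i0) * x + (f + B - 1 - (j % x - f) % x) % x
  else if totalA - j / x = i0 ∧ (f + B - 1 - j % x) % x < k0 then
    i0 * x + (f + (f + B - 1 - j % x) % x) % x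
  else pvImgF x totalA B f i0 j

theorem pvImgF_decomp (x totalA B f i0 r c : Int) (hx : 0 < x) (h0 : 0 ≤ c) (h1 : c < x) :
    pvImgF x totalA B f i0 (r * x + c)
      = if r < i0 ∧ (c - f) % x < B then (totalA - r) * x + (f + B - 1 - (c - f) % x) % x
        else if totalA - r < i0 ∧ (f + B - 1 - c) % x < B then (totalA - r) * x + (f + (f + B - 1 - c) % x) % x
        else r * x + c := by
  simp only [pvImgF, (pvRowCol x r c hx h0 h1).1, (pvRowCol x r c hx h0 h1).2]

theorem pvImg2_decomp (x totalA B f i0 k0 r c : Int) (hx : 0 < x) (h0 : 0 ≤ c) (h1 : c < x) :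
    pvImg2 x totalA B f i0 k0 (r * x + c)
      = if r = i0 ∧ (c - f) % x < k0 then (totalA - i0) * x + (f + B - 1 - (c - f) % x) % x
        else if totalA - r = i0 ∧ (f + B - 1 - c) % x < k0 then i0 * x + (f + (f + B - 1 - c) % x) % x
        else pvImgF x totalA B f i0 (r * x + c) := by
  simp only [pvImg2, (pvRowCol x r c hx h0 h1).1, (pvRowCol x r c hx h0 h1).2]

theorem pvImgF_eq_pvImage (x totalA h B f j : Int) (hx : 0 < x) :
    pvImgF x totalA B f h j = pvImage x totalA h B f j := by
  simp only [pvImgF, pvImage, PySem.Int.floordiv_eq_ediv_of_pos hx, PySem.Int.mod_eq_emod_of_pos hx]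

-- setting one cell of a mapped identity range updates the function at that index
theorem pvSetMap (N p : Int) (g : Int → Int) (v : Int) (h0 : 0 ≤ p) (h1 : p < N) :
    ((PySem.List.pyRange 0 N 1).map g).set p.toNat v
      = (PySem.List.pyRange 0 N 1).map (fun j => if j = p then v else g j) := by
  apply List.ext_getElem
  · simp
  · intro i hi1 hi2
    simp only [List.length_set, List.length_map, PySem.List.length_pyRange_one] at hi1
    simp only [List.getElem_set, List.getElem_map, PySem.List.getElem_pyRange_one]
    have hiff : (p.toNat = i) ↔ ((0 : Int) + (i : Int) = p) := by omega
    by_cases hc : p.toNat = i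
    · rw [if_pos hc, if_pos (hiff.mp hc)]
    · rw [if_neg hc, if_neg (fun h => hc (hiff.mpr h))]

def pvSwap (i1 i2 : Int) (lst : List Int) : List Int :=
  PySem.List.pySetD (PySem.List.pySetD lst i1 (PySem.List.pyGetD lst i2 0)) i2 (PySem.List.pyGetD lst i1 0)

-- the identity list is pvImgF with threshold 0
theorem pvImgF_zero (x totalA B f y : Int) (hx : 0 < x) (hN : 0 < y) (htA : totalA = y - 1) :
    (PySem.List.pyRange 0 (y * x) 1).map (fun j => pvImgF x totalA B f 0 j)
      = PySem.List.pyRange 0 (y * x) 1 := by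
  have h : ∀ j ∈ PySem.List.pyRange 0 (y * x) 1, pvImgF x totalA B f 0 j = j := by
    intro j hj
    rw [PySem.List.mem_pyRange_one] at hj
    have hr0 : 0 ≤ j / x := Int.ediv_nonneg hj.1 (le_of_lt hx)
    have hr1 : j / x < y := (Int.ediv_lt_iff_lt_mul hx).mpr hj.2
    simp only [pvImgF]
    split_ifs with hA hB
    · omega
    · omega
    · rfl
  rw [List.map_congr_left h]; simp

-- pvImg2 at threshold 0 is pvImgF
theorem pvImg2_zero (x totalA B f i0 j : Int) (hx : 0 < x) :
    pvImg2 x totalA B f i0 0 j = pvImgF x totalA B f i0 j := by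
  have h1 : 0 ≤ (j % x - f) % x := Int.emod_nonneg _ (ne_of_gt hx)
  have h2 : 0 ≤ (f + B - 1 - j % x) % x := Int.emod_nonneg _ (ne_of_gt hx)
  simp only [pvImg2]
  split_ifs with hA hB
  · omega
  · omega
  · rfl

-- pvImg2 at threshold B is pvImgF with i0+1 (on in-range indices)
theorem pvImg2_top (x B totalA y f i0 r c : Int) (hx : x = 2 * B) (hB : 0 < B)
    (htA : totalA = y - 1) (hi : 0 ≤ i0) (h2i : 2 * i0 + 2 ≤ y)
    (hc0 : 0 ≤ c) (hc1 : c < x) :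
    pvImg2 x totalA B f i0 B (r * x + c) = pvImgF x totalA B f (i0 + 1) (r * x + c) := by
  have hxpos : 0 < x := by omega
  rw [pvImg2_decomp x totalA B f i0 B r c hxpos hc0 hc1,
      pvImgF_decomp x totalA B f (i0 + 1) r c hxpos hc0 hc1,
      pvImgF_decomp x totalA B f i0 r c hxpos hc0 hc1]
  split_ifs with h1 h2 h3 h4 h5 h6 h7 h8 h9 h10 h11
  all_goals try rfl
  all_goals try omega
  all_goals first | rw [h1.1] | rw [← h4.1]

-- pvImg2 fixes both swap endpoints of round k0
theorem pvImg2_fix1 (x B totalA y f i0 k0 : Int) (hx : x = 2 * B) (hB : 0 < B)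
    (htA : totalA = y - 1) (hi : 0 ≤ i0) (h2i : 2 * i0 + 2 ≤ y) (hk : 0 ≤ k0) (hkB : k0 < B) :
    pvImg2 x totalA B f i0 k0 (i0 * x + (f + k0) % x) = i0 * x + (f + k0) % x := by
  have hxpos : 0 < x := by omega
  have hc0 : 0 ≤ (f + k0) % x := Int.emod_nonneg _ (ne_of_gt hxpos)
  have hc1 : (f + k0) % x < x := Int.emod_lt_of_pos _ hxpos
  rw [pvImg2_decomp x totalA B f i0 k0 i0 _ hxpos hc0 hc1,
      pvImgF_decomp x totalA B f i0 i0 _ hxpos hc0 hc1,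
      pvM1 x f k0 hk (by omega)]
  split_ifs with h1 h2 h3 h4 <;> first | rfl | omega

theorem pvImg2_fix2 (x B totalA y f i0 k0 : Int) (hx : x = 2 * B) (hB : 0 < B)
    (htA : totalA = y - 1) (hi : 0 ≤ i0) (h2i : 2 * i0 + 2 ≤ y) (hk : 0 ≤ k0) (hkB : k0 < B) :
    pvImg2 x totalA B f i0 k0 ((totalA - i0) * x + (f + (B - 1 - k0)) % x)
      = (totalA - i0) * x + (f + (B - 1 - k0)) % x := by
  have hxpos : 0 < x := by omega
  have hc0 : 0 ≤ (f + (B - 1 - k0)) % x := Int.emod_nonneg _ (ne_of_gt hxpos)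
  have hc1 : (f + (B - 1 - k0)) % x < x := Int.emod_lt_of_pos _ hxpos
  have hm2 : (f + B - 1 - (f + (B - 1 - k0)) % x) % x = k0 := by
    rw [show f + (B - 1 - k0) = f + B - 1 - k0 by ring, pvModSubCancel,
        Int.emod_eq_of_lt hk (by omega)]
  rw [pvImg2_decomp x totalA B f i0 k0 (totalA - i0) _ hxpos hc0 hc1,
      pvImgF_decomp x totalA B f i0 (totalA - i0) _ hxpos hc0 hc1, hm2]
  split_ifs with h1 h2 h3 h4 <;> first | rfl | omega

-- pointwise: one transposition advances the inner threshold by one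
theorem pvImg2_succ (x B totalA y f i0 k0 r c : Int) (hx : x = 2 * B) (hB : 0 < B)
    (htA : totalA = y - 1) (hf0 : 0 ≤ f) (hfx : f < x) (hi : 0 ≤ i0) (h2i : 2 * i0 + 2 ≤ y)
    (hk : 0 ≤ k0) (hkB : k0 < B) (hc0 : 0 ≤ c) (hc1 : c < x) :
    (if r * x + c = (totalA - i0) * x + (f + (B - 1 - k0)) % x then i0 * x + (f + k0) % x
     else if r * x + c = i0 * x + (f + k0) % x then (totalA - i0) * x + (f + (B - 1 - k0)) % x
     else pvImg2 x totalA B f i0 k0 (r * x + c))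
      = pvImg2 x totalA B f i0 (k0 + 1) (r * x + c) := by
  have hxpos : 0 < x := by omega
  have hd1 : 0 ≤ (f + k0) % x := Int.emod_nonneg _ (ne_of_gt hxpos)
  have hd2 : (f + k0) % x < x := Int.emod_lt_of_pos _ hxpos
  have he1 : 0 ≤ (f + (B - 1 - k0)) % x := Int.emod_nonneg _ (ne_of_gt hxpos)
  have he2 : (f + (B - 1 - k0)) % x < x := Int.emod_lt_of_pos _ hxpos
  by_cases h2 : r * x + c = (totalA - i0) * x + (f + (B - 1 - k0)) % x
  · -- j is the upper swap endpoint: it receives the lower index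
    obtain ⟨hr, hc⟩ := pvCellInj x r c (totalA - i0) _ hxpos hc0 hc1 he1 he2 h2
    rw [if_pos h2, pvImg2_decomp x totalA B f i0 (k0 + 1) r c hxpos hc0 hc1]
    have hm2 : (f + B - 1 - c) % x = k0 := by
      rw [hc, show f + (B - 1 - k0) = f + B - 1 - k0 by ring, pvModSubCancel,
          Int.emod_eq_of_lt hk (by omega)]
    rw [hm2]
    split_ifs with hA hA2
    · omega
    · rfl
    · omega
  · rw [if_neg h2]
    by_cases h1 : r * x + c = i0 * x + (f + k0) % x
    · -- j is the lower swap endpoint: it receives the upper index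
      obtain ⟨hr, hc⟩ := pvCellInj x r c i0 _ hxpos hc0 hc1 hd1 hd2 h1
      rw [if_pos h1, pvImg2_decomp x totalA B f i0 (k0 + 1) r c hxpos hc0 hc1]
      have hm1 : (c - f) % x = k0 := by rw [hc]; exact pvM1 x f k0 hk (by omega)
      rw [hm1]
      split_ifs with hA hA2
      · rw [show f + B - 1 - k0 = f + (B - 1 - k0) by ring]
      · omega
      · omega
    · -- j is untouched in round k0
      rw [if_neg h1]
      have key1 : (f + (c - f) % x) % x = c := by
        rw [pvModAddCancel]; exact Int.emod_eq_of_lt hc0 hc1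
      have key2 : (f + B - 1 - (f + B - 1 - c) % x) % x = c := by
        rw [pvModSubCancel]; exact Int.emod_eq_of_lt hc0 hc1
      have hne1 : ¬(r = i0 ∧ (c - f) % x = k0) := by
        rintro ⟨ha, hb⟩
        exact h1 (by rw [ha, ← hb, key1])
      have hne2 : ¬(totalA - r = i0 ∧ (f + B - 1 - c) % x = k0) := by
        rintro ⟨ha, hb⟩
        apply h2
        have : (f + (B - 1 - k0)) % x = c := by
          rw [show f + (B - 1 - k0) = f + B - 1 - k0 by ring, ← hb, key2]
        rw [this, ← ha]
        ring_nf
      rw [pvImg2_decomp x totalA B f i0 k0 r c hxpos hc0 hc1,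
          pvImg2_decomp x totalA B f i0 (k0 + 1) r c hxpos hc0 hc1]
      split_ifs with hA hB hC hD <;> first | rfl | omega

-- one swap advances the inner threshold
theorem pvInnerStep (x B totalA y f i0 k0 : Int) (hx : x = 2 * B) (hB : 0 < B)
    (htA : totalA = y - 1) (hf0 : 0 ≤ f) (hfx : f < x) (hi : 0 ≤ i0) (h2i : 2 * i0 + 2 ≤ y)
    (hk : 0 ≤ k0) (hkB : k0 < B) :
    pvSwap (i0 * x + (f + k0) % x) ((totalA - i0) * x + (f + (B - 1 - k0)) % x)
        ((PySem.List.pyRange 0 (y * x) 1).map (fun j => pvImg2 x totalA B f i0 k0 j))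
      = (PySem.List.pyRange 0 (y * x) 1).map (fun j => pvImg2 x totalA B f i0 (k0 + 1) j) := by
  have hxpos : 0 < x := by omega
  have hd1 : 0 ≤ (f + k0) % x := Int.emod_nonneg _ (ne_of_gt hxpos)
  have hd2 : (f + k0) % x < x := Int.emod_lt_of_pos _ hxpos
  have he1 : 0 ≤ (f + (B - 1 - k0)) % x := Int.emod_nonneg _ (ne_of_gt hxpos)
  have he2 : (f + (B - 1 - k0)) % x < x := Int.emod_lt_of_pos _ hxpos
  have hb1 := pvCellBounds x y i0 ((f + k0) % x) hi (by omega) hd1 hd2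
  have hb2 := pvCellBounds x y (totalA - i0) ((f + (B - 1 - k0)) % x) (by omega) (by omega) he1 he2
  unfold pvSwap
  rw [PySem.List.pyGetD_map_pyRange_of_nonneg _ _ _ _ hb2.1 hb2.2,
      PySem.List.pyGetD_map_pyRange_of_nonneg _ _ _ _ hb1.1 hb1.2,
      pvImg2_fix1 x B totalA y f i0 k0 hx hB htA hi h2i hk hkB,
      pvImg2_fix2 x B totalA y f i0 k0 hx hB htA hi h2i hk hkB,
      PySem.List.pySetD_of_nonneg _ _ hb1.1, pvSetMap _ _ _ _ hb1.1 hb1.2,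
      PySem.List.pySetD_of_nonneg _ _ hb2.1, pvSetMap _ _ _ _ hb2.1 hb2.2]
  apply List.map_congr_left
  intro j hj
  rw [PySem.List.mem_pyRange_one] at hj
  obtain ⟨r, c, rfl, hc0, hc1⟩ : ∃ r c, j = r * x + c ∧ 0 ≤ c ∧ c < x := by
    refine ⟨j / x, j % x, ?_, Int.emod_nonneg _ (ne_of_gt hxpos), Int.emod_lt_of_pos _ hxpos⟩
    have := Int.ediv_add_emod j x
    linarith
  exact pvImg2_succ x B totalA y f i0 k0 r c hx hB htA hf0 hfx hi h2i hk hkB hc0 hc1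

-- the full inner loop takes pvImgF i0 to pvImg2 i0 m
theorem pvInnerFold (x B totalA y f i0 : Int) (m : Nat) (hx : x = 2 * B) (hB : 0 < B)
    (htA : totalA = y - 1) (hf0 : 0 ≤ f) (hfx : f < x) (hi : 0 ≤ i0) (h2i : 2 * i0 + 2 ≤ y)
    (hm : (m : Int) ≤ B) :
    (PySem.List.pyRange 0 (m : Int) 1).foldl
        (fun lst k => pvSwap (i0 * x + (f + k) % x) ((totalA - i0) * x + (f + (B - 1 - k)) % x) lst)
        ((PySem.List.pyRange 0 (y * x) 1).map (fun j => pvImgF x totalA B f i0 j))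
      = (PySem.List.pyRange 0 (y * x) 1).map (fun j => pvImg2 x totalA B f i0 (m : Int) j) := by
  have hxpos : 0 < x := by omega
  induction m with
  | zero =>
    rw [show ((0 : Nat) : Int) = 0 by norm_num, PySem.List.pyRange_one_eq_nil (le_refl 0),
        List.foldl_nil]
    exact List.map_congr_left (fun j _ => (pvImg2_zero x totalA B f i0 j hxpos).symm)
  | succ n ih =>
    have hn : (n : Int) ≤ B := by push_cast at hm ⊢; omega
    have hcast : ((n + 1 : Nat) : Int) = (n : Int) + 1 := by push_cast; ring
    rw [hcast, PySem.List.pyRange_one_succ_right (by positivity), List.foldl_append,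
        ih hn, List.foldl_cons, List.foldl_nil]
    exact pvInnerStep x B totalA y f i0 (n : Int) hx hB htA hf0 hfx hi h2i
      (by positivity) (by push_cast at hm; omega)

theorem rgen_eq (x y N r : Int) (hy : 0 < y) (hr : 0 ≤ r) (hry : r < y)
    (hN : N = y * x) :
    pvHelpCyclic (r * x) ((r + 1) * x - 1) N
      = (PySem.List.pyRange 0 N 1).map (fun j => pvCyc (r * x) ((r + 1) * x - 1) j) := by
  unfold pvHelpCyclic
  rcases Int.lt_or_le 0 x with hx | hx
  case inr =>
    -- degenerate: x ≤ 0, every range involved is empty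
    have hN0 : N ≤ 0 := by nlinarith
    have h1 : PySem.List.pyRange 0 (r * x) 1 = [] :=
      PySem.List.pyRange_one_eq_nil (by nlinarith)
    have h2 : PySem.List.pyRange (r * x) ((r + 1) * x - 1 + 1) 1 = [] :=
      PySem.List.pyRange_one_eq_nil (by nlinarith)
    have h3 : PySem.List.pyRange ((r + 1) * x - 1 + 1) N 1 = [] :=
      PySem.List.pyRange_one_eq_nil (by nlinarith)
    have h4 : PySem.List.pyRange 0 N 1 = [] := PySem.List.pyRange_one_eq_nil hN0
    simp only [h1, h2, h3, h4, List.foldl_nil, List.map_nil]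
  · -- main case: the window [r*x, (r+1)*x-1] sits inside [0, N)
    have hs0 : 0 ≤ r * x := mul_nonneg hr (le_of_lt hx)
    have hsf : r * x ≤ (r + 1) * x - 1 + 1 := by nlinarith
    have hfN : (r + 1) * x - 1 + 1 ≤ N := by nlinarith
    have hw : (r + 1) * x - r * x = x := by ring
    rw [PySem.List.foldl_append_singleton_eq_self, PySem.List.foldl_append_singleton_eq_map,
        PySem.List.foldl_append_singleton_eq_self, List.nil_append,
        PySem.List.pyRange_one_append 0 (r * x) N hs0 (le_trans hsf hfN),
        PySem.List.pyRange_one_append (r * x) ((r + 1) * x - 1 + 1) N hsf hfN,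
        List.map_append, List.map_append]
    have hpre : List.map (fun j => pvCyc (r * x) ((r + 1) * x - 1) j) (PySem.List.pyRange 0 (r * x) 1)
        = PySem.List.pyRange 0 (r * x) 1 := by
      have h : ∀ j ∈ PySem.List.pyRange 0 (r * x) 1, pvCyc (r * x) ((r + 1) * x - 1) j = j := by
        intro j hj
        rw [PySem.List.mem_pyRange_one] at hj
        unfold pvCyc
        split_ifs with hA hB <;> omega
      rw [List.map_congr_left h]; simp
    have hsuf : List.map (fun j => pvCyc (r * x) ((r + 1) * x - 1) j)
          (PySem.List.pyRange ((r + 1) * x - 1 + 1) N 1)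
        = PySem.List.pyRange ((r + 1) * x - 1 + 1) N 1 := by
      have h : ∀ j ∈ PySem.List.pyRange ((r + 1) * x - 1 + 1) N 1,
          pvCyc (r * x) ((r + 1) * x - 1) j = j := by
        intro j hj
        rw [PySem.List.mem_pyRange_one] at hj
        unfold pvCyc
        split_ifs with hA hB <;> omega
      rw [List.map_congr_left h]; simp
    have hwin : List.map (fun j => pvCyc (r * x) ((r + 1) * x - 1) j)
          (PySem.List.pyRange (r * x) ((r + 1) * x - 1 + 1) 1)
        = List.map (fun i => if i ≠ (r + 1) * x - 1 then i + 1 else r * x)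
          (PySem.List.pyRange (r * x) ((r + 1) * x - 1 + 1) 1) := by
      apply List.map_congr_left
      intro j hj
      rw [PySem.List.mem_pyRange_one] at hj
      unfold pvCyc
      split_ifs with hA hB hC <;> omega
    rw [hpre, hsuf, hwin, ← List.append_assoc]

theorem fgen_eq (A B x y N totalA f : Int) (hx : x = 2 * B) (hy : y = A + 1)
    (hN : N = 2 * (A + 1) * B) (ht : totalA = y - 1) (hf0 : 0 ≤ f) (hfx : f < x) :
    ((PySem.List.pyRange 0 (PySem.Int.floordiv y 2) 1).foldl
        (fun lst i =>
          let block1 := (PySem.List.pyRange 0 B 1).foldl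
            (fun acc k => acc ++ [i * x + PySem.Int.mod (f + k) x]) []
          let block2 := (PySem.List.pyRange 0 B 1).foldl
            (fun acc k => acc ++ [(totalA - i) * x + PySem.Int.mod (f + k) x]) []
          (PySem.List.pyRange 0 B 1).foldl
            (fun lst k =>
              let idx1 := PySem.List.pyGetD block1 k 0
              let idx2 := PySem.List.pyGetD block2 (B - 1 - k) 0
              let v2 := PySem.List.pyGetD lst idx2 0
              let v1 := PySem.List.pyGetD lst idx1 0
              PySem.List.pySetD (PySem.List.pySetD lst idx1 v2) idx2 v1) lst)
        (PySem.List.pyRange 0 N 1))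
      = (PySem.List.pyRange 0 N 1).map (fun j => pvImage x totalA (PySem.Int.floordiv y 2) B f j) := by
  have hBpos : 0 < B := by omega
  have hxpos : 0 < x := by omega
  have hNyx : N = y * x := by rw [hN, hy, hx]; ring
  rw [PySem.Int.floordiv_eq_ediv_of_pos (by norm_num : (0 : Int) < 2)]
  rcases Int.lt_or_le 0 y with hypos | hyneg
  case inr =>
    have h1 : PySem.List.pyRange 0 (y / 2) 1 = [] := PySem.List.pyRange_one_eq_nil (by omega)
    have h2 : PySem.List.pyRange 0 N 1 = [] := PySem.List.pyRange_one_eq_nil (by nlinarith)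
    rw [h1, List.foldl_nil, h2]
    rfl
  -- 0 < y : replace the loop body by explicit transpositions, then run the invariant
  rw [PySem.List.foldl_congr_mem (PySem.List.pyRange 0 (y / 2) 1) _
      (fun lst i => (PySem.List.pyRange 0 B 1).foldl
        (fun lst k => pvSwap (i * x + (f + k) % x) ((totalA - i) * x + (f + (B - 1 - k)) % x) lst)
        lst)
      (PySem.List.pyRange 0 N 1) ?hbody]
  case hbody =>
    intro lst i _
    simp only [PySem.List.foldl_append_singleton_eq_map, List.nil_append,
      PySem.Int.mod_eq_emod_of_pos hxpos]
    apply PySem.List.foldl_congr_mem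
    intro acc k hk
    rw [PySem.List.mem_pyRange_one] at hk
    rw [PySem.List.pyGetD_map_pyRange_of_nonneg _ _ _ _ hk.1 hk.2,
        PySem.List.pyGetD_map_pyRange_of_nonneg _ _ _ _ (by omega) (by omega)]
    rfl
  have main : ∀ n : Nat, (n : Int) ≤ y / 2 →
      (PySem.List.pyRange 0 (n : Int) 1).foldl
        (fun lst i => (PySem.List.pyRange 0 B 1).foldl
          (fun lst k => pvSwap (i * x + (f + k) % x) ((totalA - i) * x + (f + (B - 1 - k)) % x) lst)
          lst)
        (PySem.List.pyRange 0 N 1)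
      = (PySem.List.pyRange 0 N 1).map (fun j => pvImgF x totalA B f (n : Int) j) := by
    intro n
    induction n with
    | zero =>
      intro _
      rw [show ((0 : Nat) : Int) = 0 by norm_num, PySem.List.pyRange_one_eq_nil (le_refl 0),
          List.foldl_nil, hNyx]
      exact (pvImgF_zero x totalA B f y hxpos hypos ht).symm
    | succ n ih =>
      intro hn1
      have hn : (n : Int) ≤ y / 2 := by push_cast at hn1 ⊢; omega
      have h2i : 2 * (n : Int) + 2 ≤ y := by push_cast at hn1; omega
      have hcast : ((n + 1 : Nat) : Int) = (n : Int) + 1 := by push_cast; ring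
      rw [hcast, PySem.List.pyRange_one_succ_right (by positivity), List.foldl_append,
          ih hn, List.foldl_cons, List.foldl_nil, hNyx]
      have hBcast : ((B.toNat : Nat) : Int) = B := by omega
      rw [show PySem.List.pyRange 0 B 1 = PySem.List.pyRange 0 ((B.toNat : Nat) : Int) 1 by
            rw [hBcast],
          pvInnerFold x B totalA y f (n : Int) B.toNat hx hBpos ht hf0 hfx (by positivity)
            h2i (by omega), hBcast]
      apply List.map_congr_left
      intro j hj
      rw [PySem.List.mem_pyRange_one] at hj
      obtain ⟨r, c, rfl, hc0, hc1⟩ : ∃ r c, j = r * x + c ∧ 0 ≤ c ∧ c < x := by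
        refine ⟨j / x, j % x, ?_, Int.emod_nonneg _ (ne_of_gt hxpos),
          Int.emod_lt_of_pos _ hxpos⟩
        have := Int.ediv_add_emod j x
        linarith
      exact pvImg2_top x B totalA y f (n : Int) r c hx hBpos ht (by positivity) h2i hc0 hc1
  have hhcast : (((y / 2).toNat : Nat) : Int) = y / 2 := by omega
  rw [← hhcast, main (y / 2).toNat (by omega), hhcast]
  exact List.map_congr_left fun j _ => pvImgF_eq_pvImage x totalA (y / 2) B f j hxpos

theorem pvFoldl2 {α β : Type} (l1 l2 : List β) (e : α) (gA gB fA fB : α → β → α)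
    (h1 : ∀ acc, ∀ z ∈ l1, gA acc z = gB acc z) (h2 : ∀ acc, ∀ z ∈ l2, fA acc z = fB acc z) :
    List.foldl fA (List.foldl gA e l1) l2 = List.foldl fB (List.foldl gB e l1) l2 := by
  rw [PySem.List.foldl_congr_mem l1 gA gB e h1, PySem.List.foldl_congr_mem l2 fA fB _ h2]

-- ===== VERDICT (by name: the statement is the Claim_ definition above) =====
theorem globe_gens_spec : Claim_equal_globe_gens := by
  intro A B _
  unfold Spec_globe_gens globe_gens globe_gens_alt
  apply congrArg PySem.Dict.items
  apply pvFoldl2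
  · intro acc r hr
    rw [PySem.List.mem_pyRange_one] at hr
    exact congrArg _ (rgen_eq (2 * B) (A + 1) (2 * (A + 1) * B) r (by omega) hr.1 hr.2 (by ring))
  · intro acc f hf
    rw [PySem.List.mem_pyRange_one] at hf
    exact congrArg (PySem.Dict.insert acc ("f" ++ PySem.Int.toStr f))
      (fgen_eq A B (2 * B) (A + 1) (2 * (A + 1) * B) (A + 1 - 1) f rfl rfl rfl rfl hf.1 hf.2)
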